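-- pv_equiv track=rewrite | github.com/bio-tools/biohackathon2021 | Mads/biotools_statistics_old/base_statistics.py | calculate_license_statistics
-- ===== SOURCE A (Python) =====
-- from typing import Dict, Union, List
--
-- def calculate_license_statistics(tools: dict) -> dict:
--     """
--     Calculate the license statistics for the tools.
--
--     :param tools: The list of tools.
--     :return: The license statistics.
--     """
--     LICENSE_TYPES: List[str] = ["OSIApproved", "Proprietary", "Other", "NoLicense"]
--     # Obtained from: https://opensource.org/licenses/alphabetical
--     OSI_APPROVED_LICENSES: List[str] = ["ISC", "CDDL-1.0", "AFL-3.0", "APL-1.0", "MPL-1.1", "OSL-2.1", "GPL-3.0",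
--                                         "MPL-2.0", "MIT", "Unlicense", "CECILL-2.1", "EPL-1.0", "NCSA", "GPL-2.0",
--                                         "BSD-2-Clause", "Artistic-2.0",  "AGPL-3.0", "LGPL-2.1", "OSL-3.0",
--                                         "BSD-3-Clause", "Artistic-1.0", "Apache-2.0", "LGPL-3.0",  "CPL-1.0"]
--     license_stats: Dict[str, int] = {key: 0 for key in LICENSE_TYPES}
--
--     for licens in [tool["license"] for tool in tools if "license" in tool]:
--         if licens in LICENSE_TYPES:
--             license_stats[licens] += 1
--         elif licens == "Not licensed":
--             license_stats["NoLicense"] += 1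
--         elif licens in OSI_APPROVED_LICENSES:
--             # Check if it is an OSI approved license
--             license_stats["OSIApproved"] += 1
--
--     return license_stats
-- ===== SOURCE B (Python) =====
-- def calculate_license_statistics(tools: dict) -> dict:
--     """Count tools per license category by summing per-key counts (reversed traversal)."""
--     OSI_APPROVED_LICENSES = ["ISC", "CDDL-1.0", "AFL-3.0", "APL-1.0", "MPL-1.1", "OSL-2.1", "GPL-3.0",
--                              "MPL-2.0", "MIT", "Unlicense", "CECILL-2.1", "EPL-1.0", "NCSA", "GPL-2.0",
--                              "BSD-2-Clause", "Artistic-2.0", "AGPL-3.0", "LGPL-2.1", "OSL-3.0",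
--                              "BSD-3-Clause", "Artistic-1.0", "Apache-2.0", "LGPL-3.0", "CPL-1.0"]
--     licenses = [tool["license"] for tool in tools if "license" in tool]
--     return {
--         "OSIApproved": licenses.count("OSIApproved") + sum(licenses.count(l) for l in OSI_APPROVED_LICENSES),
--         "Proprietary": licenses.count("Proprietary"),
--         "Other": licenses.count("Other"),
--         "NoLicense": licenses.count("NoLicense") + licenses.count("Not licensed"),
--     }
-- ===== Notes on version B (the rewrite author's own statement) =====
-- stated objective: idiomatic
-- what changed: Replaces the per-element if/elif dispatch loop mutating a stats dict with per-category counting passes: each of the four result keys is computed directly from list.count, with the OSI list and 'Not licensed' summed into their categories.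
import Mathlib
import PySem

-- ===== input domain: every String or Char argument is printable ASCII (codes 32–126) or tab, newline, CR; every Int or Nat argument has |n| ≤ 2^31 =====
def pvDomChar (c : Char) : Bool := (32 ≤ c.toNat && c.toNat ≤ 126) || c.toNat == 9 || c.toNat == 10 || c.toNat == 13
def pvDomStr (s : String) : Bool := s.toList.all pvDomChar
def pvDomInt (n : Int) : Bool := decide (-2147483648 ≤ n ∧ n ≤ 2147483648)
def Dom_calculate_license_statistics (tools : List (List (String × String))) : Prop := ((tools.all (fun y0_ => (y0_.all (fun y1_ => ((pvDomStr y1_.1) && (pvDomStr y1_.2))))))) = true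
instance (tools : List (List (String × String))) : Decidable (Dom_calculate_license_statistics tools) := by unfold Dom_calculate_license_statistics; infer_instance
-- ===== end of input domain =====

-- B replaces A's per-element if/elif dispatch into a mutated stats dict by four per-category
-- counting passes (list.count summed over each category's key set); same cost, more idiomatic.

-- ===== PORT A =====
def pvLicenseTypes : List String := ["OSIApproved", "Proprietary", "Other", "NoLicense"]

def pvOsi : List String := ["ISC", "CDDL-1.0", "AFL-3.0", "APL-1.0", "MPL-1.1", "OSL-2.1", "GPL-3.0",
  "MPL-2.0", "MIT", "Unlicense", "CECILL-2.1", "EPL-1.0", "NCSA", "GPL-2.0",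
  "BSD-2-Clause", "Artistic-2.0", "AGPL-3.0", "LGPL-2.1", "OSL-3.0",
  "BSD-3-Clause", "Artistic-1.0", "Apache-2.0", "LGPL-3.0", "CPL-1.0"]

-- [tool["license"] for tool in tools if "license" in tool]  (getD is safe: guarded by contains)
def pvLicenses (tools : List (List (String × String))) : List String :=
  (tools.filter (fun t => (PySem.Dict.mk t).contains "license")).map
    (fun t => (PySem.Dict.mk t).getD "license" "")

def pvStepA (stats : PySem.Dict String Int) (licens : String) : PySem.Dict String Int :=
  if pvLicenseTypes.contains licens then stats.modify licens 0 (· + 1)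
  else if licens == "Not licensed" then stats.modify "NoLicense" 0 (· + 1)
  else if pvOsi.contains licens then stats.modify "OSIApproved" 0 (· + 1)
  else stats

def calculate_license_statistics (tools : List (List (String × String))) : List (String × Int) :=
  ((pvLicenses tools).foldl pvStepA
    (pvLicenseTypes.foldl (fun d k => d.insert k 0) PySem.Dict.empty)).items

-- ===== PORT B =====
def calculate_license_statistics_alt (tools : List (List (String × String))) : List (String × Int) :=
  let licenses := pvLicenses tools
  [("OSIApproved", (licenses.count "OSIApproved" : Int) + (pvOsi.map (fun l => (licenses.count l : Int))).sum),
   ("Proprietary", (licenses.count "Proprietary" : Int)),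
   ("Other", (licenses.count "Other" : Int)),
   ("NoLicense", (licenses.count "NoLicense" : Int) + (licenses.count "Not licensed" : Int))]

-- ===== PRECONDITION & SPEC =====
def Spec_calculate_license_statistics (tools : List (List (String × String))) (out : List (String × Int)) : Prop := out = calculate_license_statistics_alt tools
instance (tools : List (List (String × String))) (out : List (String × Int)) : Decidable (Spec_calculate_license_statistics tools out) := by unfold Spec_calculate_license_statistics; infer_instance

-- ===== CLAIM (what is proved, stated in full; the proofs are below) =====
def Claim_equal_calculate_license_statistics : Prop := ∀ (tools : List (List (String × String))), Dom_calculate_license_statistics tools → Spec_calculate_license_statistics tools (calculate_license_statistics tools)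

-- ===== LEMMAS AND PROOFS =====

-- a 0/1 indicator summed over K counts x's occurrences in K
lemma sum_indicator (x : String) (K : List String) :
    (K.map (fun i => if x = i then (1 : Int) else 0)).sum = (K.count x : Int) := by
  induction K with
  | nil => simp
  | cons k K ih =>
    by_cases h : x = k
    · subst h; simp [ih]; omega
    · simp [ih, h, (show ¬k = x from fun e => h e.symm)]

-- summed counts over a fixed key list gain K.count x when x is consed on
lemma sum_count_cons (K : List String) (x : String) (ls : List String) :
    (K.map (fun l => (((x :: ls).count l : Nat) : Int))).sum
      = (K.map (fun l => ((ls.count l : Nat) : Int))).sum + (K.count x : Int) := by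
  induction K with
  | nil => simp
  | cons k K ih =>
    simp only [List.map_cons, List.sum_cons, List.count_cons]
    by_cases h : x = k
    · subst h; simp [sum_indicator]; ring
    · have h1 : (k == x) = false := by simpa using fun e => h e.symm
      simp [h1, h, sum_indicator]; ring

def pvCntOsi (ls : List String) : Int :=
  (ls.count "OSIApproved" : Int) + (pvOsi.map (fun l => (ls.count l : Int))).sum

lemma cntOsi_cons (x : String) (ls : List String) :
    pvCntOsi (x :: ls) = pvCntOsi ls + (if x = "OSIApproved" then 1 else 0) + (pvOsi.count x : Int) := by
  unfold pvCntOsi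
  rw [sum_count_cons]
  by_cases h : x = "OSIApproved"
  · subst h; simp; ring
  · have h2 : ("OSIApproved" == x) = false := by simpa using fun e => h e.symm
    simp [h]; ring

lemma foldA_items (ls : List String) (a b c d : Int) :
    (ls.foldl pvStepA (PySem.Dict.mk [("OSIApproved", a), ("Proprietary", b), ("Other", c), ("NoLicense", d)])).items
      = [("OSIApproved", a + pvCntOsi ls),
         ("Proprietary", b + (ls.count "Proprietary" : Int)),
         ("Other", c + (ls.count "Other" : Int)),
         ("NoLicense", d + (ls.count "NoLicense" : Int) + (ls.count "Not licensed" : Int))] := by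
  induction ls generalizing a b c d with
  | nil => simp [pvCntOsi, pvOsi]
  | cons x ls ih =>
    rw [List.foldl_cons]
    by_cases h4 : x ∈ pvLicenseTypes
    · have hc : pvLicenseTypes.contains x = true := by simpa using h4
      simp only [pvLicenseTypes, List.mem_cons, List.not_mem_nil, or_false] at h4
      rcases h4 with rfl | rfl | rfl | rfl
      · have e : pvStepA (PySem.Dict.mk [("OSIApproved", a), ("Proprietary", b), ("Other", c), ("NoLicense", d)]) "OSIApproved"
            = PySem.Dict.mk [("OSIApproved", a + 1), ("Proprietary", b), ("Other", c), ("NoLicense", d)] := rfl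
        rw [e, ih, cntOsi_cons]
        simp; ring
      · have e : pvStepA (PySem.Dict.mk [("OSIApproved", a), ("Proprietary", b), ("Other", c), ("NoLicense", d)]) "Proprietary"
            = PySem.Dict.mk [("OSIApproved", a), ("Proprietary", b + 1), ("Other", c), ("NoLicense", d)] := rfl
        rw [e, ih, cntOsi_cons]
        simp; ring
      · have e : pvStepA (PySem.Dict.mk [("OSIApproved", a), ("Proprietary", b), ("Other", c), ("NoLicense", d)]) "Other"
            = PySem.Dict.mk [("OSIApproved", a), ("Proprietary", b), ("Other", c + 1), ("NoLicense", d)] := rfl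
        rw [e, ih, cntOsi_cons]
        simp; ring
      · have e : pvStepA (PySem.Dict.mk [("OSIApproved", a), ("Proprietary", b), ("Other", c), ("NoLicense", d)]) "NoLicense"
            = PySem.Dict.mk [("OSIApproved", a), ("Proprietary", b), ("Other", c), ("NoLicense", d + 1)] := rfl
        rw [e, ih, cntOsi_cons]
        simp; ring
    · have hc : pvLicenseTypes.contains x = false := by simpa using h4
      by_cases hn : x = "Not licensed"
      · subst hn
        have e : pvStepA (PySem.Dict.mk [("OSIApproved", a), ("Proprietary", b), ("Other", c), ("NoLicense", d)]) "Not licensed"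
            = PySem.Dict.mk [("OSIApproved", a), ("Proprietary", b), ("Other", c), ("NoLicense", d + 1)] := rfl
        rw [e, ih, cntOsi_cons]
        simp; ring
      · by_cases ho : x ∈ pvOsi
        · have hoc : pvOsi.contains x = true := by simpa using ho
          have hnb : (x == "Not licensed") = false := by simpa using hn
          have e : pvStepA (PySem.Dict.mk [("OSIApproved", a), ("Proprietary", b), ("Other", c), ("NoLicense", d)]) x
              = PySem.Dict.mk [("OSIApproved", a + 1), ("Proprietary", b), ("Other", c), ("NoLicense", d)] := by
            unfold pvStepA; rw [hc, hnb, hoc]; rfl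
          rw [e, ih, cntOsi_cons]
          have hone : (pvOsi.count x : Int) = 1 := by
            have : pvOsi.count x = 1 := List.count_eq_one_of_mem (by decide) ho
            simp [this]
          have hxo : x ≠ "OSIApproved" := by
            intro e2; subst e2; exact absurd ho (by decide)
          have hxp : x ≠ "Proprietary" := by intro e2; subst e2; exact absurd ho (by decide)
          have hxt : x ≠ "Other" := by intro e2; subst e2; exact absurd ho (by decide)
          have hxn : x ≠ "NoLicense" := by intro e2; subst e2; exact absurd ho (by decide)
          simp [hone, hxo, hxp, hxt, hxn, hn]
          ring
        · have hoc : pvOsi.contains x = false := by simpa using ho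
          have hnb : (x == "Not licensed") = false := by simpa using hn
          have e : pvStepA (PySem.Dict.mk [("OSIApproved", a), ("Proprietary", b), ("Other", c), ("NoLicense", d)]) x
              = PySem.Dict.mk [("OSIApproved", a), ("Proprietary", b), ("Other", c), ("NoLicense", d)] := by
            simp [pvStepA, hnb, h4, ho]
          rw [e, ih, cntOsi_cons]
          have hzero : (pvOsi.count x : Int) = 0 := by
            have hz : pvOsi.count x = 0 := List.count_eq_zero_of_not_mem ho
            simp [hz]
          have hxp : x ∉ pvLicenseTypes := h4
          simp only [pvLicenseTypes, List.mem_cons, List.not_mem_nil, or_false, not_or] at hxp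
          obtain ⟨h1, h2, h3, h5⟩ := hxp
          simp [hzero, h1, h2, h3, h5, hn]

-- ===== VERDICT (by name: the statement is the Claim_ definition above) =====
theorem calculate_license_statistics_spec : Claim_equal_calculate_license_statistics := by
  intro tools _
  unfold Spec_calculate_license_statistics
  unfold calculate_license_statistics calculate_license_statistics_alt
  show (List.foldl pvStepA
      (PySem.Dict.mk [("OSIApproved", 0), ("Proprietary", 0), ("Other", 0), ("NoLicense", 0)])
      (pvLicenses tools)).items = _
  rw [foldA_items]
  simp [pvCntOsi]
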